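-- pv_equiv track=rewrite | github.com/mixmikmic/GH_code_analysis | python/Digital-Assyriology-HW.py | small_partition
-- ===== SOURCE A (Python) =====
-- def small_partition(line_no):
--     ln = int(''.join(c for c in line_no if c.isdigit()))
--     if(ln <= 13):
--         return "1.1"
--     elif (ln <= 21):
--         return "1.2"
--     elif (ln <= 69):
--         return "2.1"
--     elif (ln <= 113):
--         return "2.2"
--     elif (ln <= 134):
--         return "2.3"
--     elif (ln <= 169):
--         return "3.1"
--     elif (ln <= 221):
--         return "3.2"
--     elif (ln <= 227):
--         return "4.1"
--     elif (ln <= 273):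
--         return "4.2"
--     elif (ln <= 280):
--         return "5.1"
--     elif (ln <= 283):
--         return "5.2"
--     elif (ln <= 310):
--         return "6"
--     return "0"
-- ===== SOURCE B (Python) =====
-- _THRESHOLDS = [13, 21, 69, 113, 134, 169, 221, 227, 273, 280, 283, 310]
-- _LABELS = ["1.1", "1.2", "2.1", "2.2", "2.3", "3.1", "3.2", "4.1", "4.2", "5.1", "5.2", "6"]
--
--
-- def small_partition(line_no):
--     ln = int(''.join(filter(str.isdigit, line_no)))
--     # binary search: lowest index i with ln <= _THRESHOLDS[i] (bisect_left)
--     lo, hi = 0, len(_THRESHOLDS)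
--     while lo < hi:
--         mid = (lo + hi) // 2
--         if _THRESHOLDS[mid] < ln:
--             lo = mid + 1
--         else:
--             hi = mid
--     return _LABELS[lo] if lo < len(_LABELS) else "0"
-- ===== Notes on version B (the rewrite author's own statement) =====
-- stated objective: alternative
-- what changed: Replaces A's sequential 12-branch if/elif comparison ladder with a hand-rolled binary search (bisect_left) over a sorted threshold array followed by an indexed label lookup.
-- outside the precondition, e.g. on small_partition(''): A raises ValueError, B raises ValueError; on small_partition('abc'): A raises ValueError, B raises ValueError
import Mathlib
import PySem

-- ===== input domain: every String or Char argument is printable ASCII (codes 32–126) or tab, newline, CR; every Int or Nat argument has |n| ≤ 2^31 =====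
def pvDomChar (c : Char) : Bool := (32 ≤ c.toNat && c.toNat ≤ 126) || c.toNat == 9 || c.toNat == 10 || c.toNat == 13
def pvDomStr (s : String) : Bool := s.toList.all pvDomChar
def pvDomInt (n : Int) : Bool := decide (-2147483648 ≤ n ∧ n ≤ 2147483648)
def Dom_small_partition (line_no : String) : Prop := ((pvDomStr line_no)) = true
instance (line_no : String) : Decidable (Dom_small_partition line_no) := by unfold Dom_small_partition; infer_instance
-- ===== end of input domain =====

-- B replaces A's 12-branch if/elif ladder with a binary search over a sorted threshold array plus a label table (alternative decomposition, same result).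

-- ===== PORT A =====
-- A's if/elif comparison ladder
def pvLadder (ln : Int) : String :=
  if ln ≤ 13 then "1.1"
  else if ln ≤ 21 then "1.2"
  else if ln ≤ 69 then "2.1"
  else if ln ≤ 113 then "2.2"
  else if ln ≤ 134 then "2.3"
  else if ln ≤ 169 then "3.1"
  else if ln ≤ 221 then "3.2"
  else if ln ≤ 227 then "4.1"
  else if ln ≤ 273 then "4.2"
  else if ln ≤ 280 then "5.1"
  else if ln ≤ 283 then "5.2"
  else if ln ≤ 310 then "6"
  else "0"

def small_partition (line_no : String) : String :=
  match PySem.Int.ofChars? (line_no.toList.filter PySem.Chars.isdigit) with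
  | none => ""   -- int('') raises ValueError in Python; excluded by Pre_
  | some ln => pvLadder ln

-- ===== PORT B =====
def pvThresholds : List Int :=
  [13, 21, 69, 113, 134, 169, 221, 227, 273, 280, 283, 310]

def pvLabels : List String :=
  ["1.1", "1.2", "2.1", "2.2", "2.3", "3.1", "3.2", "4.1", "4.2", "5.1", "5.2", "6"]

-- B's while-loop binary search (bisect_left): lowest i in [lo,hi) with ln ≤ thresholds[i].
-- The fuel argument (hi - lo at the call site) is only a structural totality guard: the
-- interval shrinks by at least one per iteration, so it never runs out before lo = hi.
def pvBisectF : Nat → Int → Nat → Nat → Nat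
  | 0, _, lo, _ => lo
  | fuel + 1, ln, lo, hi =>
    if lo < hi then
      let mid := (lo + hi) / 2
      if pvThresholds.getD mid 0 < ln then pvBisectF fuel ln (mid + 1) hi
      else pvBisectF fuel ln lo mid
    else lo

def pvBisect (ln : Int) (lo hi : Nat) : Nat := pvBisectF (hi - lo) ln lo hi

def small_partition_alt (line_no : String) : String :=
  match PySem.Int.ofChars? (line_no.toList.filter PySem.Chars.isdigit) with
  | none => ""   -- int('') raises ValueError in Python; excluded by Pre_
  | some ln =>
    let lo := pvBisect ln 0 pvThresholds.length
    if lo < pvLabels.length then pvLabels.getD lo "" else "0"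

-- ===== PRECONDITION & SPEC =====
-- Pre_ excludes exactly the strings containing no ASCII digit, on which int('') raises ValueError in both A and B.
def Pre_small_partition (line_no : String) : Prop :=
  line_no.toList.filter PySem.Chars.isdigit ≠ []
instance (line_no : String) : Decidable (Pre_small_partition line_no) := by
  unfold Pre_small_partition; infer_instance
def pvWitness_small_partition : String := "line 42"

def Spec_small_partition (line_no : String) (out : String) : Prop := out = small_partition_alt line_no
instance (line_no : String) (out : String) : Decidable (Spec_small_partition line_no out) := by unfold Spec_small_partition; infer_instance

-- ===== CLAIM (what is proved, stated in full; the proofs are below) =====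
def Claim_equal_small_partition : Prop := ∀ (line_no : String), Dom_small_partition line_no → Pre_small_partition line_no → Spec_small_partition line_no (small_partition line_no)

-- ===== LEMMAS AND PROOFS =====

theorem pvMonoFin : ∀ i j : Fin 12, (i:Nat) ≤ (j:Nat) →
    pvThresholds.getD (i:Nat) 0 ≤ pvThresholds.getD (j:Nat) 0 := by decide

theorem pvMono (i j : Nat) (hij : i ≤ j) (hj : j < 12) :
    pvThresholds.getD i 0 ≤ pvThresholds.getD j 0 :=
  pvMonoFin ⟨i, by omega⟩ ⟨j, hj⟩ hij

theorem pvBisect_inv (ln : Int) (n : Nat) : ∀ lo hi : Nat, hi - lo ≤ n → lo ≤ hi → hi ≤ 12 →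
    (∀ i, i < lo → pvThresholds.getD i 0 < ln) →
    (∀ i, hi ≤ i → i < 12 → ln ≤ pvThresholds.getD i 0) →
    lo ≤ pvBisectF n ln lo hi ∧ pvBisectF n ln lo hi ≤ 12 ∧
    (∀ i, i < pvBisectF n ln lo hi → pvThresholds.getD i 0 < ln) ∧
    (∀ i, pvBisectF n ln lo hi ≤ i → i < 12 → ln ≤ pvThresholds.getD i 0) := by
  induction n with
  | zero =>
    intro lo hi hn hlh h12 hlow hhigh
    have he : lo = hi := by omega
    subst he
    rw [pvBisectF]
    exact ⟨le_refl _, by omega, hlow, hhigh⟩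
  | succ n ih =>
    intro lo hi hn hlh h12 hlow hhigh
    rw [pvBisectF]
    by_cases h : lo < hi
    · rw [if_pos h]
      simp only
      by_cases hc : pvThresholds.getD ((lo + hi) / 2) 0 < ln
      · rw [if_pos hc]
        have hmid1 : (lo + hi) / 2 < hi := by omega
        have hmid2 : lo ≤ (lo + hi) / 2 := by omega
        have r := ih ((lo + hi) / 2 + 1) hi (by omega) (by omega) h12
          (by intro i hi'
              rcases Nat.lt_succ_iff_lt_or_eq.mp hi' with h' | h'
              · calc pvThresholds.getD i 0 ≤ pvThresholds.getD ((lo+hi)/2) 0 :=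
                      pvMono i ((lo+hi)/2) (by omega) (by omega)
                  _ < ln := hc
              · subst h'; exact hc)
          hhigh
        exact ⟨by omega, r.2.1, r.2.2.1, r.2.2.2⟩
      · rw [if_neg hc]
        have hmid1 : (lo + hi) / 2 < hi := by omega
        have r := ih lo ((lo + hi) / 2) (by omega) (by omega) (by omega) hlow
          (by intro i hi' hi12
              calc ln ≤ pvThresholds.getD ((lo+hi)/2) 0 := not_lt.mp hc
                _ ≤ pvThresholds.getD i 0 := pvMono ((lo+hi)/2) i hi' hi12)
        exact ⟨r.1, by omega, r.2.2.1, r.2.2.2⟩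
    · rw [if_neg h]
      exact ⟨le_refl _, by omega, hlow, fun i h1 h2 => hhigh i (by omega) h2⟩

-- A's comparison ladder agrees with B's indexed lookup at the binary-search result.
theorem pv_ladder_eq_search (ln : Int) :
    pvLadder ln
      = (if pvBisect ln 0 pvThresholds.length < pvLabels.length
         then pvLabels.getD (pvBisect ln 0 pvThresholds.length) "" else "0") := by
  rw [show pvThresholds.length = 12 from rfl, show pvLabels.length = 12 from rfl,
    show pvBisect ln 0 12 = pvBisectF 12 ln 0 12 from rfl]
  obtain ⟨-, h12, hlow, hhigh⟩ :=
    pvBisect_inv ln 12 0 12 (by omega) (by omega) (by omega)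
      (fun i h => absurd h (by omega)) (fun i h1 h2 => absurd h1 (by omega))
  generalize hg : pvBisectF 12 ln 0 12 = r at h12 hlow hhigh ⊢
  clear hg
  interval_cases r
  · -- r = 0
    have hb : ln ≤ (13:Int) := by
      have h := hhigh 0 (by omega) (by omega)
      rwa [show pvThresholds.getD 0 0 = 13 from by rfl] at h
    rw [if_pos (by norm_num : (0:Nat) < 12), show pvLabels.getD 0 "" = "1.1" from by rfl]
    rw [pvLadder,
      if_pos (by omega : ln ≤ 13)]
  · -- r = 1
    have ha : (13:Int) < ln := by
      have h := hlow 0 (by omega)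
      rwa [show pvThresholds.getD 0 0 = 13 from by rfl] at h
    have hb : ln ≤ (21:Int) := by
      have h := hhigh 1 (by omega) (by omega)
      rwa [show pvThresholds.getD 1 0 = 21 from by rfl] at h
    rw [if_pos (by norm_num : (1:Nat) < 12), show pvLabels.getD 1 "" = "1.2" from by rfl]
    rw [pvLadder,
      if_neg (by omega : ¬ ln ≤ 13),
      if_pos (by omega : ln ≤ 21)]
  · -- r = 2
    have ha : (21:Int) < ln := by
      have h := hlow 1 (by omega)
      rwa [show pvThresholds.getD 1 0 = 21 from by rfl] at h
    have hb : ln ≤ (69:Int) := by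
      have h := hhigh 2 (by omega) (by omega)
      rwa [show pvThresholds.getD 2 0 = 69 from by rfl] at h
    rw [if_pos (by norm_num : (2:Nat) < 12), show pvLabels.getD 2 "" = "2.1" from by rfl]
    rw [pvLadder,
      if_neg (by omega : ¬ ln ≤ 13),
      if_neg (by omega : ¬ ln ≤ 21),
      if_pos (by omega : ln ≤ 69)]
  · -- r = 3
    have ha : (69:Int) < ln := by
      have h := hlow 2 (by omega)
      rwa [show pvThresholds.getD 2 0 = 69 from by rfl] at h
    have hb : ln ≤ (113:Int) := by
      have h := hhigh 3 (by omega) (by omega)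
      rwa [show pvThresholds.getD 3 0 = 113 from by rfl] at h
    rw [if_pos (by norm_num : (3:Nat) < 12), show pvLabels.getD 3 "" = "2.2" from by rfl]
    rw [pvLadder,
      if_neg (by omega : ¬ ln ≤ 13),
      if_neg (by omega : ¬ ln ≤ 21),
      if_neg (by omega : ¬ ln ≤ 69),
      if_pos (by omega : ln ≤ 113)]
  · -- r = 4
    have ha : (113:Int) < ln := by
      have h := hlow 3 (by omega)
      rwa [show pvThresholds.getD 3 0 = 113 from by rfl] at h
    have hb : ln ≤ (134:Int) := by
      have h := hhigh 4 (by omega) (by omega)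
      rwa [show pvThresholds.getD 4 0 = 134 from by rfl] at h
    rw [if_pos (by norm_num : (4:Nat) < 12), show pvLabels.getD 4 "" = "2.3" from by rfl]
    rw [pvLadder,
      if_neg (by omega : ¬ ln ≤ 13),
      if_neg (by omega : ¬ ln ≤ 21),
      if_neg (by omega : ¬ ln ≤ 69),
      if_neg (by omega : ¬ ln ≤ 113),
      if_pos (by omega : ln ≤ 134)]
  · -- r = 5
    have ha : (134:Int) < ln := by
      have h := hlow 4 (by omega)
      rwa [show pvThresholds.getD 4 0 = 134 from by rfl] at h
    have hb : ln ≤ (169:Int) := by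
      have h := hhigh 5 (by omega) (by omega)
      rwa [show pvThresholds.getD 5 0 = 169 from by rfl] at h
    rw [if_pos (by norm_num : (5:Nat) < 12), show pvLabels.getD 5 "" = "3.1" from by rfl]
    rw [pvLadder,
      if_neg (by omega : ¬ ln ≤ 13),
      if_neg (by omega : ¬ ln ≤ 21),
      if_neg (by omega : ¬ ln ≤ 69),
      if_neg (by omega : ¬ ln ≤ 113),
      if_neg (by omega : ¬ ln ≤ 134),
      if_pos (by omega : ln ≤ 169)]
  · -- r = 6
    have ha : (169:Int) < ln := by
      have h := hlow 5 (by omega)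
      rwa [show pvThresholds.getD 5 0 = 169 from by rfl] at h
    have hb : ln ≤ (221:Int) := by
      have h := hhigh 6 (by omega) (by omega)
      rwa [show pvThresholds.getD 6 0 = 221 from by rfl] at h
    rw [if_pos (by norm_num : (6:Nat) < 12), show pvLabels.getD 6 "" = "3.2" from by rfl]
    rw [pvLadder,
      if_neg (by omega : ¬ ln ≤ 13),
      if_neg (by omega : ¬ ln ≤ 21),
      if_neg (by omega : ¬ ln ≤ 69),
      if_neg (by omega : ¬ ln ≤ 113),
      if_neg (by omega : ¬ ln ≤ 134),
      if_neg (by omega : ¬ ln ≤ 169),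
      if_pos (by omega : ln ≤ 221)]
  · -- r = 7
    have ha : (221:Int) < ln := by
      have h := hlow 6 (by omega)
      rwa [show pvThresholds.getD 6 0 = 221 from by rfl] at h
    have hb : ln ≤ (227:Int) := by
      have h := hhigh 7 (by omega) (by omega)
      rwa [show pvThresholds.getD 7 0 = 227 from by rfl] at h
    rw [if_pos (by norm_num : (7:Nat) < 12), show pvLabels.getD 7 "" = "4.1" from by rfl]
    rw [pvLadder,
      if_neg (by omega : ¬ ln ≤ 13),
      if_neg (by omega : ¬ ln ≤ 21),
      if_neg (by omega : ¬ ln ≤ 69),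
      if_neg (by omega : ¬ ln ≤ 113),
      if_neg (by omega : ¬ ln ≤ 134),
      if_neg (by omega : ¬ ln ≤ 169),
      if_neg (by omega : ¬ ln ≤ 221),
      if_pos (by omega : ln ≤ 227)]
  · -- r = 8
    have ha : (227:Int) < ln := by
      have h := hlow 7 (by omega)
      rwa [show pvThresholds.getD 7 0 = 227 from by rfl] at h
    have hb : ln ≤ (273:Int) := by
      have h := hhigh 8 (by omega) (by omega)
      rwa [show pvThresholds.getD 8 0 = 273 from by rfl] at h
    rw [if_pos (by norm_num : (8:Nat) < 12), show pvLabels.getD 8 "" = "4.2" from by rfl]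
    rw [pvLadder,
      if_neg (by omega : ¬ ln ≤ 13),
      if_neg (by omega : ¬ ln ≤ 21),
      if_neg (by omega : ¬ ln ≤ 69),
      if_neg (by omega : ¬ ln ≤ 113),
      if_neg (by omega : ¬ ln ≤ 134),
      if_neg (by omega : ¬ ln ≤ 169),
      if_neg (by omega : ¬ ln ≤ 221),
      if_neg (by omega : ¬ ln ≤ 227),
      if_pos (by omega : ln ≤ 273)]
  · -- r = 9
    have ha : (273:Int) < ln := by
      have h := hlow 8 (by omega)
      rwa [show pvThresholds.getD 8 0 = 273 from by rfl] at h
    have hb : ln ≤ (280:Int) := by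
      have h := hhigh 9 (by omega) (by omega)
      rwa [show pvThresholds.getD 9 0 = 280 from by rfl] at h
    rw [if_pos (by norm_num : (9:Nat) < 12), show pvLabels.getD 9 "" = "5.1" from by rfl]
    rw [pvLadder,
      if_neg (by omega : ¬ ln ≤ 13),
      if_neg (by omega : ¬ ln ≤ 21),
      if_neg (by omega : ¬ ln ≤ 69),
      if_neg (by omega : ¬ ln ≤ 113),
      if_neg (by omega : ¬ ln ≤ 134),
      if_neg (by omega : ¬ ln ≤ 169),
      if_neg (by omega : ¬ ln ≤ 221),
      if_neg (by omega : ¬ ln ≤ 227),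
      if_neg (by omega : ¬ ln ≤ 273),
      if_pos (by omega : ln ≤ 280)]
  · -- r = 10
    have ha : (280:Int) < ln := by
      have h := hlow 9 (by omega)
      rwa [show pvThresholds.getD 9 0 = 280 from by rfl] at h
    have hb : ln ≤ (283:Int) := by
      have h := hhigh 10 (by omega) (by omega)
      rwa [show pvThresholds.getD 10 0 = 283 from by rfl] at h
    rw [if_pos (by norm_num : (10:Nat) < 12), show pvLabels.getD 10 "" = "5.2" from by rfl]
    rw [pvLadder,
      if_neg (by omega : ¬ ln ≤ 13),
      if_neg (by omega : ¬ ln ≤ 21),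
      if_neg (by omega : ¬ ln ≤ 69),
      if_neg (by omega : ¬ ln ≤ 113),
      if_neg (by omega : ¬ ln ≤ 134),
      if_neg (by omega : ¬ ln ≤ 169),
      if_neg (by omega : ¬ ln ≤ 221),
      if_neg (by omega : ¬ ln ≤ 227),
      if_neg (by omega : ¬ ln ≤ 273),
      if_neg (by omega : ¬ ln ≤ 280),
      if_pos (by omega : ln ≤ 283)]
  · -- r = 11
    have ha : (283:Int) < ln := by
      have h := hlow 10 (by omega)
      rwa [show pvThresholds.getD 10 0 = 283 from by rfl] at h
    have hb : ln ≤ (310:Int) := by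
      have h := hhigh 11 (by omega) (by omega)
      rwa [show pvThresholds.getD 11 0 = 310 from by rfl] at h
    rw [if_pos (by norm_num : (11:Nat) < 12), show pvLabels.getD 11 "" = "6" from by rfl]
    rw [pvLadder,
      if_neg (by omega : ¬ ln ≤ 13),
      if_neg (by omega : ¬ ln ≤ 21),
      if_neg (by omega : ¬ ln ≤ 69),
      if_neg (by omega : ¬ ln ≤ 113),
      if_neg (by omega : ¬ ln ≤ 134),
      if_neg (by omega : ¬ ln ≤ 169),
      if_neg (by omega : ¬ ln ≤ 221),
      if_neg (by omega : ¬ ln ≤ 227),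
      if_neg (by omega : ¬ ln ≤ 273),
      if_neg (by omega : ¬ ln ≤ 280),
      if_neg (by omega : ¬ ln ≤ 283),
      if_pos (by omega : ln ≤ 310)]
  · -- r = 12
    have ha : (310:Int) < ln := by
      have h := hlow 11 (by omega)
      rwa [show pvThresholds.getD 11 0 = 310 from by rfl] at h
    rw [if_neg (by norm_num : ¬ (12:Nat) < 12)]
    rw [pvLadder,
      if_neg (by omega : ¬ ln ≤ 13),
      if_neg (by omega : ¬ ln ≤ 21),
      if_neg (by omega : ¬ ln ≤ 69),
      if_neg (by omega : ¬ ln ≤ 113),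
      if_neg (by omega : ¬ ln ≤ 134),
      if_neg (by omega : ¬ ln ≤ 169),
      if_neg (by omega : ¬ ln ≤ 221),
      if_neg (by omega : ¬ ln ≤ 227),
      if_neg (by omega : ¬ ln ≤ 273),
      if_neg (by omega : ¬ ln ≤ 280),
      if_neg (by omega : ¬ ln ≤ 283),
      if_neg (by omega : ¬ ln ≤ 310)]


-- ===== VERDICT (by name: the statement is the Claim_ definition above) =====
theorem small_partition_spec : Claim_equal_small_partition := by
  intro line_no _ _
  unfold Spec_small_partition small_partition small_partition_alt
  cases PySem.Int.ofChars? (line_no.toList.filter PySem.Chars.isdigit) with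
  | none => rfl
  | some ln => exact pv_ladder_eq_search ln
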